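-- pv_equiv track=rewrite | github.com/awaykim/Algorithm | 백준/Silver/3986. 좋은 단어/좋은 단어.py | solution
-- ===== SOURCE A (Python) =====
-- def solution(arr, n):
--     cnt = 0
--     for i in range(n):
--         stck = []
--         for element in arr[i]:
--             if stck and stck[-1] == element:
--                 stck.pop()
--             else: stck.append(element)
--         if not stck: cnt += 1
--         del stck
--     return cnt
-- ===== SOURCE B (Python) =====
-- def solution(arr, n):
--     cnt = 0
--     for i in range(n):
--         s = arr[i]
--         # reduce to a fixpoint: each pass removes adjacent equal pairs in one
--         # left-to-right scan; repeat until a pass changes nothing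
--         while True:
--             out = []
--             j = 0
--             L = len(s)
--             while j < L:
--                 if j + 1 < L and s[j] == s[j + 1]:
--                     j += 2
--                 else:
--                     out.append(s[j])
--                     j += 1
--             t = ''.join(out)
--             if t == s:
--                 break
--             s = t
--         if s == "":
--             cnt += 1
--     return cnt
-- ===== Notes on version B (the rewrite author's own statement) =====
-- stated objective: alternative
-- what changed: Replaces the single stack pass per word by an iterate-to-fixpoint loop of left-to-right scans, each scan deleting adjacent equal pairs; a word counts if the fixpoint is the empty string (equal by confluence of adjacent-pair cancellation).
import Mathlib
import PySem

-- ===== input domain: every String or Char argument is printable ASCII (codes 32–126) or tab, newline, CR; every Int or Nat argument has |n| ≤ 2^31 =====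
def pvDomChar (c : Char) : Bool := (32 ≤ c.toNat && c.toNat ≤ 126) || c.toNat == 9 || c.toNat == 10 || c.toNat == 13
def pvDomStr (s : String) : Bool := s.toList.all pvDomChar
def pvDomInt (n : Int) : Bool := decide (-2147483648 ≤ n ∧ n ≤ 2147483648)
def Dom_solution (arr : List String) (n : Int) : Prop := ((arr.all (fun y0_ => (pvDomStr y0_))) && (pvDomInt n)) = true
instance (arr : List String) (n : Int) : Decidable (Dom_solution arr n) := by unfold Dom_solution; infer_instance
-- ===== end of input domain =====

-- B replaces A's single stack pass per word by an iterate-to-fixpoint loop of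
-- pair-deletion scans (alternative algorithm, not faster); equivalence is by
-- confluence of adjacent-pair cancellation.


-- ===== PORT A =====
-- Python's stack: append at the end, peek stck[-1], pop from the end.
def stepA (st : List Char) (c : Char) : List Char :=
  if st ≠ [] ∧ st.getLast? = some c then st.dropLast else st ++ [c]

-- arr[i] is in range for every i of range(n) whenever Pre_ holds (A raises
-- IndexError otherwise), so the getD "" default is never used inside Pre_.
def solution (arr : List String) (n : Int) : Int :=
  (PySem.List.pyRange 0 n 1).foldl (fun cnt i =>
    let stck := ((PySem.List.pyGet? arr i).getD "").toList.foldl stepA []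
    if stck = [] then cnt + 1 else cnt) 0

-- ===== PORT B =====
-- one left-to-right scan deleting adjacent equal pairs (Source B's inner while loop)
def onePass : List Char → List Char
  | [] => []
  | [c] => [c]
  | a :: b :: rest => if a = b then onePass rest else a :: onePass (b :: rest)

-- Source B's 'while True' loop; a changing pass strictly shortens the string, so
-- fuel = length makes the same iteration total.
def reduceFix : Nat → List Char → List Char
  | 0, s => s
  | fuel + 1, s => let t := onePass s; if t = s then s else reduceFix fuel t

def solution_alt (arr : List String) (n : Int) : Int :=
  (PySem.List.pyRange 0 n 1).foldl (fun cnt i =>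
    let s := ((PySem.List.pyGet? arr i).getD "").toList
    let r := reduceFix s.length s
    if r = [] then cnt + 1 else cnt) 0

-- ===== PRECONDITION & SPEC =====
-- A indexes arr[i] for every i < n: n > len(arr) raises IndexError (so does B); excluded.
def Pre_solution (arr : List String) (n : Int) : Prop := n ≤ (arr.length : Int)
instance (arr : List String) (n : Int) : Decidable (Pre_solution arr n) := by unfold Pre_solution; infer_instance

def pvWitness_solution : List String × Int := (["aabb", "ab", ""], 3)

def Spec_solution (arr : List String) (n : Int) (out : Int) : Prop := out = solution_alt arr n
instance (arr : List String) (n : Int) (out : Int) : Decidable (Spec_solution arr n out) := by unfold Spec_solution; infer_instance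

-- ===== CLAIM (what is proved, stated in full; the proofs are below) =====
def Claim_equal_solution : Prop := ∀ (arr : List String) (n : Int), Dom_solution arr n → Pre_solution arr n → Spec_solution arr n (solution arr n)

-- ===== LEMMAS AND PROOFS =====

-- cons-headed view of A's stack (stepR st c acts on st.reverse)
def stepR (r : List Char) (c : Char) : List Char :=
  match r with
  | [] => [c]
  | h :: t => if h = c then t else c :: h :: t

theorem stepA_eq_reverse (st : List Char) (c : Char) :
    stepA st c = (stepR st.reverse c).reverse := by
  cases h : st.reverse with
  | nil =>
    have : st = [] := by simpa using congrArg List.reverse h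
    simp [this, stepA, stepR]
  | cons x t =>
    have hst : st = t.reverse ++ [x] := by
      have := congrArg List.reverse h
      simpa using this
    subst hst
    by_cases hx : x = c <;>
      simp [stepA, stepR, hx, List.dropLast_append_of_ne_nil]

theorem foldA_eq_reverse (s : List Char) : ∀ st : List Char,
    s.foldl stepA st = (s.foldl stepR st.reverse).reverse := by
  induction s with
  | nil => intro st; simp
  | cons c s ih =>
    intro st
    simp only [List.foldl_cons]
    rw [ih, stepA_eq_reverse, List.reverse_reverse]

theorem stepR_irr {r : List Char} (h : List.IsChain (· ≠ ·) r) (c : Char) :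
    List.IsChain (· ≠ ·) (stepR r c) := by
  cases r with
  | nil => simp [stepR]
  | cons x t =>
    by_cases hx : x = c
    · simpa [stepR, hx] using h.tail
    · simpa [stepR, hx, List.isChain_cons_cons] using ⟨fun he => hx he.symm, h⟩

theorem stepR_stepR {r : List Char} (h : List.IsChain (· ≠ ·) r) (c : Char) :
    stepR (stepR r c) c = r := by
  cases r with
  | nil => simp [stepR]
  | cons x t =>
    by_cases hx : x = c
    · subst hx
      cases t with
      | nil => simp [stepR]
      | cons y t' =>
        have hxy : x ≠ y := (List.isChain_cons_cons.mp h).1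
        simp [stepR, Ne.symm hxy]
    · simp [stepR, hx]

theorem fold_stepR_of_chain (s : List Char) : ∀ r : List Char,
    List.IsChain (· ≠ ·) (r.reverse ++ s) →
    s.foldl stepR r = (r.reverse ++ s).reverse := by
  induction s with
  | nil => intro r _; simp
  | cons c s ih =>
    intro r h
    have hstep : stepR r c = c :: r := by
      cases r with
      | nil => rfl
      | cons x t =>
        have hx : x ≠ c := by
          have := (List.isChain_append.mp h).2.2
          exact this x (by simp) c (by simp)
        simp [stepR, hx]
    have h' : List.IsChain (· ≠ ·) ((c :: r).reverse ++ s) := by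
      simpa using h
    simp only [List.foldl_cons, hstep, ih (c :: r) h']
    simp

theorem length_onePass_le (s : List Char) : (onePass s).length ≤ s.length := by
  induction s using onePass.induct with
  | case1 => simp [onePass]
  | case2 c => simp [onePass]
  | case3 b rest ih => simp only [onePass]; simp; omega
  | case4 a b rest hab ih => simp only [onePass, if_neg hab]; simpa using ih

theorem length_onePass_lt {s : List Char} (h : onePass s ≠ s) :
    (onePass s).length < s.length := by
  induction s using onePass.induct with
  | case1 => simp [onePass] at h
  | case2 c => simp [onePass] at h
  | case3 b rest ih =>
    simp only [onePass]
    have := length_onePass_le rest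
    simp; omega
  | case4 a b rest hab ih =>
    simp only [onePass, if_neg hab] at h ⊢
    have hne : onePass (b :: rest) ≠ b :: rest := fun he => h (by rw [he])
    simpa using ih hne

theorem chain_of_onePass_fix {s : List Char} (h : onePass s = s) :
    List.IsChain (· ≠ ·) s := by
  induction s using onePass.induct with
  | case1 => simp
  | case2 c => exact List.IsChain.singleton c
  | case3 b rest ih =>
    exfalso
    rw [onePass, if_pos rfl] at h
    have h1 := congrArg List.length h
    have h2 := length_onePass_le rest
    simp at h1; omega
  | case4 a b rest hab ih =>
    rw [onePass, if_neg hab] at h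
    have h2 : onePass (b :: rest) = b :: rest := by injection h
    exact List.isChain_cons_cons.mpr ⟨hab, ih h2⟩

theorem fold_stepR_onePass (s : List Char) : ∀ r : List Char,
    List.IsChain (· ≠ ·) r →
    (onePass s).foldl stepR r = s.foldl stepR r := by
  induction s using onePass.induct with
  | case1 => intro r _; rfl
  | case2 c => intro r _; rfl
  | case3 b rest ih =>
    intro r hr
    rw [onePass, if_pos rfl, ih r hr]
    simp only [List.foldl_cons]
    rw [stepR_stepR hr]
  | case4 a b rest hab ih =>
    intro r hr
    rw [onePass, if_neg hab]
    simp only [List.foldl_cons]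
    exact ih (stepR r a) (stepR_irr hr a)

-- the fixpoint of pair-deletion scans IS the stack reduction
theorem reduceFix_eq_foldA : ∀ (fuel : Nat) (s : List Char), s.length ≤ fuel →
    reduceFix fuel s = s.foldl stepA [] := by
  intro fuel
  induction fuel with
  | zero =>
    intro s hs
    have : s = [] := List.length_eq_zero_iff.mp (Nat.le_zero.mp hs)
    simp [this, reduceFix]
  | succ fuel ih =>
    intro s hs
    by_cases hfix : onePass s = s
    · have hch := chain_of_onePass_fix hfix
      rw [reduceFix]
      simp only [hfix, if_pos]
      rw [foldA_eq_reverse]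
      rw [show ([] : List Char).reverse = [] from rfl]
      rw [fold_stepR_of_chain s [] (by simpa using hch)]
      simp
    · have hlt := length_onePass_lt hfix
      rw [reduceFix]
      simp only [if_neg hfix]
      rw [ih (onePass s) (by omega)]
      rw [foldA_eq_reverse, foldA_eq_reverse]
      rw [show ([] : List Char).reverse = [] from rfl]
      rw [fold_stepR_onePass s [] (by simp)]

theorem inner_eq (w : List Char) : reduceFix w.length w = w.foldl stepA [] :=
  reduceFix_eq_foldA w.length w le_rfl

-- ===== VERDICT (by name: the statement is the Claim_ definition above) =====
theorem solution_spec : Claim_equal_solution := by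
  intro arr n _ _
  unfold Spec_solution solution solution_alt
  congr 1
  funext cnt i
  simp only [inner_eq]
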